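-- pv_equiv track=rewrite | github.com/lkj10/algorithm-study | kwangjin/12주차/setup.py | solution
-- ===== SOURCE A (Python) =====
-- import math
--
-- def solution(n, stations, w):
--     answer = 0
--     station_list = [(0, 0)]
--
--     for station in stations:
--         if station - w > 0 :
--             left = station - w
--         else:
--             left = 0
--         if station + w < n+1 :
--             right = station + w
--         else:
--             right = n+1
--         station_list.append((left, right))
--
--     station_list.append((n+1, n+1))
--
--     for i in range(len(station_list)-1):
--         dis = station_list[i+1][0] - station_list[i][1] - 1
--         answer += math.ceil(dis/(2*w + 1))
--
--     return answer
-- ===== SOURCE B (Python) =====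
-- def solution(n, stations, w):
--     # Divide and conquer: a segment of stations reduces to (first_left, count_of_APs_for
--     # its internal gaps, last_right); merge two halves with one exact ceil-division for the
--     # junction gap; finally attach the 0 and n+1 sentinels.
--     b = 2 * w + 1
--     cd = lambda d: -(-d // b)  # exact integer ceil(d / b)
--     def seg(arr):
--         if len(arr) == 1:
--             s = arr[0]
--             return (max(s - w, 0), 0, min(s + w, n + 1))
--         m = len(arr) // 2
--         l1, c1, r1 = seg(arr[:m])
--         l2, c2, r2 = seg(arr[m:])
--         return (l1, c1 + cd(l2 - r1 - 1) + c2, r2)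
--     if not stations:
--         return cd(n + 1 - 0 - 1)
--     l, c, r = seg(stations)
--     return cd(l - 0 - 1) + c + cd(n + 1 - r - 1)
-- ===== Notes on version B (the rewrite author's own statement) =====
-- stated objective: alternative
-- what changed: Replaces A's two sequential loops (materialize a clamped interval list with sentinels, then an index-based scan of adjacent pairs) with a divide-and-conquer: each half of the stations is reduced recursively to a (first_left, internal-AP-count, last_right) summary, halves are merged with one exact integer ceil-division for the junction gap, and the 0 / n+1 sentinels are attached at the top; math.ceil of a float quotient becomes exact integer ceiling division -((-d)//(2w+1)).
import Mathlib
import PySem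

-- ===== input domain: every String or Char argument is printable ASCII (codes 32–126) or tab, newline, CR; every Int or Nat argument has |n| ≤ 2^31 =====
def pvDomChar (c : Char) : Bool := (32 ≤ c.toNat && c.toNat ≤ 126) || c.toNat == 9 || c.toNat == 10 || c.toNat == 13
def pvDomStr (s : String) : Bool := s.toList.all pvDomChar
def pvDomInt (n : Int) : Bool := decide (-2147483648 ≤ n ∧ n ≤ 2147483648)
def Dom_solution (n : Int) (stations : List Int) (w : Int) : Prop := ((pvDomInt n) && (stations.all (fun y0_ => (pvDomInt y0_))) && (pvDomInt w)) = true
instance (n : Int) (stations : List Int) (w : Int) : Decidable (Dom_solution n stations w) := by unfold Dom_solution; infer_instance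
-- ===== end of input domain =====

-- B replaces A's two sequential loops (build station_list, then index-scan adjacent pairs) by a
-- divide-and-conquer over the stations: each half reduces to (first_left, internal count, last_right),
-- halves merge with one ceil-division for the junction gap, sentinels are attached at the top.
-- math.ceil(dis/(2*w+1)) is ported as the exact ceiling division -((-dis)//(2*w+1)); on the stated
-- |int| ≤ 2^31 domain all operands stay well below 2^53, so Python's float division never rounds
-- across an integer and the two agree exactly.

-- ===== PORT A =====
def solution (n : Int) (stations : List Int) (w : Int) : Int :=
  let answer : Int := 0
  let station_list : List (Int × Int) := [(0, 0)]
  let station_list := stations.foldl (fun acc station =>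
      let left : Int := if station - w > 0 then station - w else 0
      let right : Int := if station + w < n + 1 then station + w else n + 1
      acc ++ [(left, right)]) station_list
  let station_list := station_list ++ [(n + 1, n + 1)]
  (PySem.List.pyRange 0 ((station_list.length : Int) - 1) 1).foldl (fun answer i =>
      let dis := (PySem.List.pyGetD station_list (i + 1) (0, 0)).1
                   - (PySem.List.pyGetD station_list i (0, 0)).2 - 1
      answer + (-(PySem.Int.floordiv (-dis) (2 * w + 1)))) answer

-- ===== PORT B =====
/-- Segment summary of a nonempty station slice: (first_left, internal AP count, last_right). -/
def segB (n w b : Int) : List Int → Int × Int × Int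
  | [] => (0, 0, 0)      -- unreachable: seg is only called on nonempty slices
  | [s] => (max (s - w) 0, 0, min (s + w) (n + 1))
  | s :: t :: rest =>
      let m := (s :: t :: rest).length / 2
      let x := segB n w b ((s :: t :: rest).take m)
      let y := segB n w b ((s :: t :: rest).drop m)
      (x.1, x.2.1 + (-(PySem.Int.floordiv (-(y.1 - x.2.2 - 1)) b)) + y.2.1, y.2.2)
termination_by l => l.length
decreasing_by
  · simp; omega
  · simp; omega

def solution_alt (n : Int) (stations : List Int) (w : Int) : Int :=
  let b := 2 * w + 1
  match stations with
  | [] => -(PySem.Int.floordiv (-(n + 1 - 0 - 1)) b)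
  | s :: rest =>
      let r := segB n w b (s :: rest)
      (-(PySem.Int.floordiv (-(r.1 - 0 - 1)) b)) + r.2.1
        + (-(PySem.Int.floordiv (-(n + 1 - r.2.2 - 1)) b))

-- ===== PRECONDITION & SPEC =====
def Spec_solution (n : Int) (stations : List Int) (w : Int) (out : Int) : Prop := out = solution_alt n stations w
instance (n : Int) (stations : List Int) (w : Int) (out : Int) : Decidable (Spec_solution n stations w out) := by unfold Spec_solution; infer_instance

-- ===== CLAIM (what is proved, stated in full; the proofs are below) =====
def Claim_equal_solution : Prop := ∀ (n : Int) (stations : List Int) (w : Int), Dom_solution n stations w → Spec_solution n stations w (solution n stations w)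

-- ===== LEMMAS AND PROOFS =====

/-- The ceiling-division summand both programs add per gap. -/
def gg (w : Int) : Int → Int → Int := fun a p => -(PySem.Int.floordiv (-(a - p - 1)) (2 * w + 1))

/-- The clamped (left, right) interval of a station, as A computes it. -/
def ff (n w : Int) : Int → Int × Int := fun station =>
  ((if station - w > 0 then station - w else 0),
   (if station + w < n + 1 then station + w else n + 1))

/-- Sum of g over the adjacent pairs of a list of intervals: g next.1 cur.2. -/
def adjSum (g : Int → Int → Int) : List (Int × Int) → Int
  | a :: b :: rest => g b.1 a.2 + adjSum g (b :: rest)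
  | _ => 0

/-- A's second loop (indexed adjacent scan) computes acc + adjSum. -/
lemma idxfold (g : Int → Int → Int) (d : Int × Int) :
    ∀ (L : List (Int × Int)) (a : Int × Int) (acc : Int),
      (List.range L.length).foldl
        (fun ans k => ans + g ((a :: L).getD (k + 1) d).1 ((a :: L).getD k d).2) acc
      = acc + adjSum g (a :: L) := by
  intro L
  induction L with
  | nil => intro a acc; simp [adjSum]
  | cons b L' ih =>
    intro a acc
    rw [show (b :: L').length = L'.length + 1 from rfl, List.range_succ_eq_map,
        List.foldl_cons, List.foldl_map]
    have := ih b (acc + g ((a :: b :: L').getD 1 d).1 ((a :: b :: L').getD 0 d).2)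
    simp only [List.getD_cons_succ, List.getD_cons_zero] at this ⊢
    rw [this]
    simp [adjSum, add_assoc]

/-- Version of idxfold matching the Int-indexed pyGetD shape of port A. -/
lemma idxfold' (g : Int → Int → Int) (d : Int × Int) (a : Int × Int) (L : List (Int × Int))
    (acc : Int) :
    (List.range L.length).foldl
      (fun (ans : Int) (k : Nat) => ans + g (PySem.List.pyGetD (a :: L) ((k : Int) + 1) d).1
                            (PySem.List.pyGetD (a :: L) ((k : Int)) d).2) acc
    = acc + adjSum g (a :: L) := by
  have hfun : (fun (ans : Int) (k : Nat) =>
        ans + g (PySem.List.pyGetD (a :: L) ((k : Int) + 1) d).1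
                (PySem.List.pyGetD (a :: L) ((k : Int)) d).2)
      = (fun ans k => ans + g ((a :: L).getD (k + 1) d).1 ((a :: L).getD k d).2) := by
    funext ans k
    rw [show ((k : Int) + 1) = ((k + 1 : Nat) : Int) by push_cast; ring,
       PySem.List.pyGetD_natCast, PySem.List.pyGetD_natCast]
  rw [hfun]
  exact idxfold g d L a acc

lemma A_eval (n : Int) (stations : List Int) (w : Int) :
    solution n stations w
      = 0 + adjSum (gg w) ((0, 0) :: (stations.map (ff n w) ++ [(n + 1, n + 1)])) := by
  simp only [solution]
  rw [show (fun (acc : List (Int × Int)) station =>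
        acc ++ [((if station - w > 0 then station - w else 0 : Int),
                 (if station + w < n + 1 then station + w else n + 1 : Int))])
      = (fun acc station => acc ++ [ff n w station]) from rfl,
     PySem.List.foldl_append_singleton_eq_map]
  simp only [List.nil_append, List.cons_append]
  rw [show ((((0, 0) :: (stations.map (ff n w) ++ [(n + 1, n + 1)])).length : Int) - 1)
        = ((stations.map (ff n w) ++ [(n + 1, n + 1)]).length : Nat) by
      simp,
     PySem.List.pyRange_zero_natCast, List.foldl_map]
  exact idxfold' (gg w) (0, 0) (0, 0) (stations.map (ff n w) ++ [(n + 1, n + 1)]) 0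

/-- adjSum splits across a concatenation of two nonempty lists, with one junction term. -/
lemma adjSum_append (g : Int → Int → Int) :
    ∀ (X Y : List (Int × Int)) (a c : Int × Int),
      adjSum g ((a :: X) ++ (c :: Y))
        = adjSum g (a :: X) + g c.1 ((a :: X).getLast (by simp)).2 + adjSum g (c :: Y) := by
  intro X
  induction X with
  | nil => intro Y a c; simp [adjSum]; try ring
  | cons b X' ih =>
    intro Y a c
    have := ih Y b c
    simp only [List.cons_append] at this ⊢
    rw [show adjSum g (a :: b :: (X' ++ c :: Y)) = g b.1 a.2 + adjSum g (b :: (X' ++ c :: Y))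
          from rfl, this]
    simp [adjSum, List.getLast]
    try ring

/-- segB on a nonempty slice returns (first left, adjSum of internal gaps, last right). -/
lemma seg_eval (n w : Int) :
    ∀ (k : Nat) (s : Int) (rest : List Int), (s :: rest).length ≤ k →
      segB n w (2 * w + 1) (s :: rest)
        = ((ff n w ((s :: rest).head (by simp))).1,
           adjSum (gg w) ((s :: rest).map (ff n w)),
           (ff n w ((s :: rest).getLast (by simp))).2) := by
  intro k
  induction k with
  | zero => intro s rest h; simp at h
  | succ k ih =>
    intro s rest h
    match rest with
    | [] =>
      simp only [segB, ff, adjSum, List.map, List.head, List.getLast]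
      refine Prod.ext ?_ (Prod.ext rfl ?_) <;> simp <;> split_ifs <;> omega
    | t :: rest' =>
      rw [segB]
      have hlen : (s :: t :: rest').length = rest'.length + 2 := by simp
      set arr := s :: t :: rest' with harr
      set m := arr.length / 2 with hm
      have hm1 : 1 ≤ m := by rw [hm, hlen]; omega
      have hmlt : m < arr.length := by omega
      -- decompose take and drop as nonempty lists
      obtain ⟨x, X, hX⟩ : ∃ x X, arr.take m = x :: X := by
        cases htk : arr.take m with
        | nil => exfalso; have h0 := congrArg List.length htk; simp at h0; omega
        | cons x X => exact ⟨x, X, rfl⟩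
      obtain ⟨y, Y, hY⟩ : ∃ y Y, arr.drop m = y :: Y := by
        cases hdp : arr.drop m with
        | nil => exfalso; have h0 := congrArg List.length hdp; simp at h0; omega
        | cons y Y => exact ⟨y, Y, rfl⟩
      have hXlen : (x :: X).length ≤ k := by
        have h0 := congrArg List.length hX; simp at h0 ⊢; omega
      have hYlen : (y :: Y).length ≤ k := by
        have h0 := congrArg List.length hY; simp at h0 ⊢; omega
      have happ : (x :: X) ++ (y :: Y) = arr := by rw [← hX, ← hY, List.take_append_drop]
      rw [hX, hY, ih x X hXlen, ih y Y hYlen]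
      -- head / getLast transport along the take/drop decomposition
      have hhead : (x :: X).head (by simp) = arr.head (by simp [harr]) := by
        have := congrArg (fun l => l.head?) happ
        simp at this
        simpa [List.head?_eq_some_head] using this
      have hlast : (y :: Y).getLast (by simp) = arr.getLast (by simp [harr]) := by
        have := congrArg (fun l => l.getLast?) happ
        simp at this
        simpa [List.getLast?_eq_some_getLast] using this
      have hmap : (x :: X).map (ff n w) ++ (y :: Y).map (ff n w) = arr.map (ff n w) := by
        rw [← List.map_append, happ]
      -- assemble
      have hh2 : (x :: X).head (by simp) = s := by rw [hhead]; rfl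
      have hl2 : (y :: Y).getLast (by simp) = (s :: t :: rest').getLast (by simp) := hlast
      refine Prod.ext ?_ (Prod.ext ?_ ?_)
      · exact congrArg (fun z => (ff n w z).1) hh2
      · simp only
        rw [← hmap]
        have := adjSum_append (gg w) (X.map (ff n w)) (Y.map (ff n w)) (ff n w x) (ff n w y)
        simp only [List.map_cons] at this ⊢
        rw [this]
        have hgl : ((ff n w x :: X.map (ff n w)).getLast (by simp))
            = ff n w ((x :: X).getLast (by simp)) :=
          List.getLast_map (f := ff n w) (l := x :: X) (by simp)
        rw [hgl, gg]
        rfl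
      · exact congrArg (fun z => (ff n w z).2) hl2

-- ===== VERDICT (by name: the statement is the Claim_ definition above) =====
theorem solution_spec : Claim_equal_solution := by
  intro n stations w _
  unfold Spec_solution
  rw [A_eval]
  match stations with
  | [] =>
    simp [solution_alt, adjSum, gg]
  | s :: rest =>
    simp only [solution_alt]
    rw [seg_eval n w (s :: rest).length s rest le_rfl]
    have e1 := adjSum_append (gg w) (ff n w s :: rest.map (ff n w)) []
        ((0, 0) : Int × Int) ((n + 1, n + 1) : Int × Int)
    have e2 := adjSum_append (gg w) [] (rest.map (ff n w))
        ((0, 0) : Int × Int) (ff n w s)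
    have hgl : ((ff n w s :: rest.map (ff n w)).getLast (by simp))
        = ff n w ((s :: rest).getLast (by simp)) :=
      List.getLast_map (f := ff n w) (l := s :: rest) (by simp)
    have hg2 : (((0, 0) : Int × Int) :: ff n w s :: rest.map (ff n w)).getLast (by simp)
        = ff n w ((s :: rest).getLast (by simp)) := by
      rw [List.getLast_cons (by simp)]; exact hgl
    rw [hg2] at e1
    simp only [List.map_cons, List.cons_append, List.nil_append] at e1 e2 ⊢
    rw [e1, e2]
    simp only [adjSum, gg, List.getLast_singleton, List.head_cons]
    ring
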